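-- pv_equiv track=rewrite | github.com/dav12id3/MethylCraft | helper.py | degenerate_primer
-- ===== SOURCE A (Python) =====
-- def degenerate_primer(seq, strand='forward'):
--     result = ''
--     i = 0
--     while i < len(seq) - 1:
--         c, g = seq[i], seq[i + 1]
--         if strand == 'forward' and c == 'C' and g == 'G':
--             result += '<span style="color:blue;"><strong>Y</strong></span>'
--             i += 1  # move to 'G'
--         elif strand == 'reverse' and c == 'C' and g == 'G':
--             result += 'C' + '<span style="color:blue;"><strong>R</strong></span>'
--             i += 2  # skip both
--         else:
--             result += c
--             i += 1
--     if i == len(seq) - 1: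
--         result += seq[-1]
--     return result
-- ===== SOURCE B (Python) =====
-- SPAN_Y = '<span style="color:blue;"><strong>Y</strong></span>'
-- SPAN_R = '<span style="color:blue;"><strong>R</strong></span>'
--
--
-- def degenerate_primer(seq, strand='forward'):
--     # Non-overlapping textual substitution of each 'CG' dinucleotide:
--     # forward keeps the G ('CG' -> span(Y) + 'G'), reverse keeps the C
--     # ('CG' -> 'C' + span(R)); any other strand leaves seq unchanged.
--     if strand == 'forward':
--         return seq.replace('CG', SPAN_Y + 'G')
--     if strand == 'reverse':
--         return seq.replace('CG', 'C' + SPAN_R)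
--     return seq
-- ===== Notes on version B (the rewrite author's own statement) =====
-- stated objective: idiomatic
-- what changed: Replaces the hand-maintained index while-loop (with its step-by-one/step-by-two bookkeeping and trailing-character fixup) by a single non-overlapping str.replace substitution per strand, passthrough for any other strand.
import Mathlib
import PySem

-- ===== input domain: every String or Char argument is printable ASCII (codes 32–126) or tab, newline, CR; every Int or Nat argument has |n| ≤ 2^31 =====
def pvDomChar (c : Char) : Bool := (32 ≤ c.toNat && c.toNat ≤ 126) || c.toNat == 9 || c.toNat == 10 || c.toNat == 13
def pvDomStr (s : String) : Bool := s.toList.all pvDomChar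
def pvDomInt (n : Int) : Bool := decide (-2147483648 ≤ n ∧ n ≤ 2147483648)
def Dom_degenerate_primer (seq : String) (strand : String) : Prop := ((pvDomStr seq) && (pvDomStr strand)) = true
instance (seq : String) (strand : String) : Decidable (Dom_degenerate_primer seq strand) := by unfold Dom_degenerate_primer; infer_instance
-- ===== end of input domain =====

-- B replaces A's index-driven while-loop by one non-overlapping str.replace substitution per strand (idiomatic).


-- ===== PORT A =====
-- the while loop of A: i is the Python index, result the accumulated string.
-- seq[i] / seq[i+1] are read with Str.pyGet?; the loop guard i < len(seq)-1
-- guarantees both are in range, so '.getD ' '' is exact (never the default).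
def degLoop (seq : String) (strand : String) (i : Nat) (result : String) : String :=
  if h : (i : Int) < PySem.Str.len seq - 1 then
    let c := (PySem.Str.pyGet? seq (i : Int)).getD ' '
    let g := (PySem.Str.pyGet? seq ((i : Int) + 1)).getD ' '
    if strand = "forward" ∧ c = 'C' ∧ g = 'G' then
      degLoop seq strand (i + 1) (result ++ "<span style=\"color:blue;\"><strong>Y</strong></span>")
    else if strand = "reverse" ∧ c = 'C' ∧ g = 'G' then
      degLoop seq strand (i + 2) (result ++ "C" ++ "<span style=\"color:blue;\"><strong>R</strong></span>")
    else
      degLoop seq strand (i + 1) (result.push c)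
  else
    if (i : Int) = PySem.Str.len seq - 1 then
      result.push ((PySem.Str.pyGet? seq (-1)).getD ' ')
    else result
termination_by seq.toList.length - i
decreasing_by
  · simp only [PySem.Str.len_eq] at h; omega
  · simp only [PySem.Str.len_eq] at h; omega
  · simp only [PySem.Str.len_eq] at h; omega

def degenerate_primer (seq : String) (strand : String) : String :=
  degLoop seq strand 0 ""

-- ===== PORT B =====
def spanY : String := "<span style=\"color:blue;\"><strong>Y</strong></span>"
def spanR : String := "<span style=\"color:blue;\"><strong>R</strong></span>"

def degenerate_primer_alt (seq : String) (strand : String) : String :=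
  if strand = "forward" then PySem.Str.replace seq "CG" (spanY ++ "G")
  else if strand = "reverse" then PySem.Str.replace seq "CG" ("C" ++ spanR)
  else seq

-- ===== PRECONDITION & SPEC =====
def Spec_degenerate_primer (seq : String) (strand : String) (out : String) : Prop := out = degenerate_primer_alt seq strand
instance (seq : String) (strand : String) (out : String) : Decidable (Spec_degenerate_primer seq strand out) := by unfold Spec_degenerate_primer; infer_instance

-- ===== CLAIM (what is proved, stated in full; the proofs are below) =====
def Claim_equal_degenerate_primer : Prop := ∀ (seq : String) (strand : String), Dom_degenerate_primer seq strand → Spec_degenerate_primer seq strand (degenerate_primer seq strand)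

-- ===== LEMMAS AND PROOFS =====

-- pure (accumulator-free, list-level) semantics of the two substitutions
def fwdSem : List Char → List Char
  | [] => []
  | [a] => [a]
  | a :: b :: t =>
    if a = 'C' ∧ b = 'G' then spanY.toList ++ fwdSem (b :: t)
    else a :: fwdSem (b :: t)

def revSem : List Char → List Char
  | [] => []
  | [a] => [a]
  | a :: b :: t =>
    if a = 'C' ∧ b = 'G' then 'C' :: spanR.toList ++ revSem t
    else a :: revSem (b :: t)

theorem fwdSem_G (t : List Char) : fwdSem ('G' :: t) = 'G' :: fwdSem t := by
  cases t with
  | nil => rfl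
  | cons b u => simp [fwdSem]

-- replace.go with pattern "CG" and replacement spanY++"G" computes fwdSem
theorem go_fwd (fuel : Nat) : ∀ (l acc : List Char), l.length ≤ fuel →
    PySem.Chars.replace.go ['C', 'G'] (spanY.toList ++ ['G']) fuel l acc
      = acc.reverse ++ fwdSem l := by
  induction fuel with
  | zero =>
    intro l acc h
    have : l = [] := List.eq_nil_of_length_eq_zero (by omega)
    subst this; simp [PySem.Chars.replace.go, fwdSem]
  | succ n ih =>
    intro l acc h
    cases l with
    | nil => simp [PySem.Chars.replace.go, fwdSem]
    | cons c t =>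
      rw [PySem.Chars.replace.go]
      by_cases hp : List.isPrefixOf ['C', 'G'] (c :: t) = true
      · obtain ⟨u, hu⟩ : ∃ u, c :: t = 'C' :: 'G' :: u := by
          cases t with
          | nil => simp [List.isPrefixOf] at hp
          | cons g u =>
            simp [List.isPrefixOf] at hp
            exact ⟨u, by simp [← hp.1, ← hp.2]⟩
        simp only [hu] at *
        simp only [hp, if_true]
        rw [ih _ _ (by simp only [List.length_cons, List.length_drop] at h ⊢; omega)]
        simp [fwdSem, fwdSem_G]
      · simp only [hp, if_false, Bool.false_eq_true]
        rw [ih t (c :: acc) (by simp only [List.length_cons] at h; omega)]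
        have hnm : ¬ (c = 'C' ∧ t.head? = some 'G') := by
          intro ⟨hc, hg⟩
          cases t with
          | nil => simp at hg
          | cons b u =>
            simp at hg
            subst hc; subst hg
            simp [List.isPrefixOf] at hp
        cases t with
        | nil => simp [fwdSem]
        | cons b u =>
          have : ¬ (c = 'C' ∧ b = 'G') := by
            intro ⟨h1, h2⟩; exact hnm ⟨h1, by simp [h2]⟩
          simp [fwdSem, this]

theorem go_rev (fuel : Nat) : ∀ (l acc : List Char), l.length ≤ fuel →
    PySem.Chars.replace.go ['C', 'G'] ('C' :: spanR.toList) fuel l acc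
      = acc.reverse ++ revSem l := by
  induction fuel with
  | zero =>
    intro l acc h
    have : l = [] := List.eq_nil_of_length_eq_zero (by omega)
    subst this; simp [PySem.Chars.replace.go, revSem]
  | succ n ih =>
    intro l acc h
    cases l with
    | nil => simp [PySem.Chars.replace.go, revSem]
    | cons c t =>
      rw [PySem.Chars.replace.go]
      by_cases hp : List.isPrefixOf ['C', 'G'] (c :: t) = true
      · obtain ⟨u, hu⟩ : ∃ u, c :: t = 'C' :: 'G' :: u := by
          cases t with
          | nil => simp [List.isPrefixOf] at hp
          | cons g u =>
            simp [List.isPrefixOf] at hp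
            exact ⟨u, by simp [← hp.1, ← hp.2]⟩
        simp only [hu] at *
        simp only [hp, if_true]
        rw [ih _ _ (by simp only [List.length_cons, List.length_drop] at h ⊢; omega)]
        simp [revSem]
      · simp only [hp, if_false, Bool.false_eq_true]
        rw [ih t (c :: acc) (by simp only [List.length_cons] at h; omega)]
        have hnm : ¬ (c = 'C' ∧ t.head? = some 'G') := by
          intro ⟨hc, hg⟩
          cases t with
          | nil => simp at hg
          | cons b u =>
            simp at hg
            subst hc; subst hg
            simp [List.isPrefixOf] at hp
        cases t with
        | nil => simp [revSem]
        | cons b u =>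
          have : ¬ (c = 'C' ∧ b = 'G') := by
            intro ⟨h1, h2⟩; exact hnm ⟨h1, by simp [h2]⟩
          simp [revSem, this]

theorem replace_fwd (cs : List Char) :
    PySem.Chars.replace cs ['C', 'G'] (spanY.toList ++ ['G']) = fwdSem cs := by
  rw [PySem.Chars.replace]
  simp only [List.isEmpty]
  simpa using go_fwd cs.length cs [] le_rfl

theorem replace_rev (cs : List Char) :
    PySem.Chars.replace cs ['C', 'G'] ('C' :: spanR.toList) = revSem cs := by
  rw [PySem.Chars.replace]
  simp only [List.isEmpty]
  simpa using go_rev cs.length cs [] le_rfl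

-- A-side loop lemmas: degLoop at index i computes the substitution of drop i
theorem degLoop_fwd (seq : String) (fuel : Nat) : ∀ (i : Nat) (result : String),
    seq.toList.length - i ≤ fuel →
    (degLoop seq "forward" i result).toList
      = result.toList ++ fwdSem (seq.toList.drop i) := by
  induction fuel with
  | zero =>
    intro i result h
    rw [degLoop, dif_neg (by simp only [PySem.Str.len_eq]; omega),
        if_neg (by simp only [PySem.Str.len_eq]; omega)]
    simp [List.drop_eq_nil_of_le (by omega : seq.toList.length ≤ i), fwdSem]
  | succ n ih =>
    intro i result h
    rw [degLoop]
    by_cases hg : (i : Int) < PySem.Str.len seq - 1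
    · rw [dif_pos hg]
      simp only [PySem.Str.len_eq] at hg
      have hi : i < seq.toList.length := by omega
      have hi1 : i + 1 < seq.toList.length := by omega
      have hc : PySem.Str.pyGet? seq (i : Int) = some (seq.toList[i]) := by
        simp [List.getElem?_eq_getElem hi]
      have hg2 : PySem.Str.pyGet? seq ((i : Int) + 1) = some (seq.toList[i+1]) := by
        rw [show ((i : Int) + 1) = ((i + 1 : Nat) : Int) by push_cast; ring,
            PySem.Str.pyGet?_natCast]
        simp [List.getElem?_eq_getElem hi1]
      have hd : seq.toList.drop i = seq.toList[i] :: seq.toList.drop (i+1) :=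
        List.drop_eq_getElem_cons hi
      have hd1 : seq.toList.drop (i+1) = seq.toList[i+1] :: seq.toList.drop (i+2) :=
        List.drop_eq_getElem_cons hi1
      simp only [hc, hg2, Option.getD_some]
      by_cases hcg : seq.toList[i] = 'C' ∧ seq.toList[i+1] = 'G'
      · rw [if_pos (by simp [hcg.1, hcg.2]), ih (i+1) _ (by omega), hd, hd1]
        simp [fwdSem, fwdSem_G, hcg.1, hcg.2, spanY]
      · rw [if_neg (by simp [hcg]), if_neg (by simp), ih (i+1) _ (by omega), hd, hd1]
        simp only [fwdSem, if_neg hcg, String.toList_push]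
        simp
    · rw [dif_neg hg]
      simp only [PySem.Str.len_eq] at hg
      by_cases he : (i : Int) = PySem.Str.len seq - 1
      · rw [if_pos he]
        simp only [PySem.Str.len_eq] at he
        have hi : i < seq.toList.length := by omega
        have hlen : seq.toList.length = i + 1 := by omega
        have hd : seq.toList.drop i = [seq.toList[i]] := by
          rw [List.drop_eq_getElem_cons hi, List.drop_eq_nil_of_le (by omega)]
        have hneg : PySem.Str.pyGet? seq (-1) = some (seq.toList[i]) := by
          simp [PySem.List.pyGet?_neg_one, List.getLast?_eq_getElem?, hlen]
        rw [hd, hneg]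
        simp [fwdSem]
      · rw [if_neg he]
        simp only [PySem.Str.len_eq] at he
        simp [List.drop_eq_nil_of_le (by omega : seq.toList.length ≤ i), fwdSem]

theorem degLoop_rev (seq : String) (fuel : Nat) : ∀ (i : Nat) (result : String),
    seq.toList.length - i ≤ fuel →
    (degLoop seq "reverse" i result).toList
      = result.toList ++ revSem (seq.toList.drop i) := by
  induction fuel with
  | zero =>
    intro i result h
    rw [degLoop, dif_neg (by simp only [PySem.Str.len_eq]; omega),
        if_neg (by simp only [PySem.Str.len_eq]; omega)]
    simp [List.drop_eq_nil_of_le (by omega : seq.toList.length ≤ i), revSem]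
  | succ n ih =>
    intro i result h
    rw [degLoop]
    by_cases hg : (i : Int) < PySem.Str.len seq - 1
    · rw [dif_pos hg]
      simp only [PySem.Str.len_eq] at hg
      have hi : i < seq.toList.length := by omega
      have hi1 : i + 1 < seq.toList.length := by omega
      have hc : PySem.Str.pyGet? seq (i : Int) = some (seq.toList[i]) := by
        simp [List.getElem?_eq_getElem hi]
      have hg2 : PySem.Str.pyGet? seq ((i : Int) + 1) = some (seq.toList[i+1]) := by
        rw [show ((i : Int) + 1) = ((i + 1 : Nat) : Int) by push_cast; ring,
            PySem.Str.pyGet?_natCast]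
        simp [List.getElem?_eq_getElem hi1]
      have hd : seq.toList.drop i = seq.toList[i] :: seq.toList.drop (i+1) :=
        List.drop_eq_getElem_cons hi
      have hd1 : seq.toList.drop (i+1) = seq.toList[i+1] :: seq.toList.drop (i+2) :=
        List.drop_eq_getElem_cons hi1
      simp only [hc, hg2, Option.getD_some]
      by_cases hcg : seq.toList[i] = 'C' ∧ seq.toList[i+1] = 'G'
      · rw [if_neg (by simp), if_pos (by simp [hcg.1, hcg.2]), ih (i+2) _ (by omega), hd, hd1]
        simp [revSem, hcg.1, hcg.2, spanR]
      · rw [if_neg (by simp), if_neg (by simp [hcg]), ih (i+1) _ (by omega), hd, hd1]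
        simp only [revSem, if_neg hcg, String.toList_push]
        simp
    · rw [dif_neg hg]
      simp only [PySem.Str.len_eq] at hg
      by_cases he : (i : Int) = PySem.Str.len seq - 1
      · rw [if_pos he]
        simp only [PySem.Str.len_eq] at he
        have hi : i < seq.toList.length := by omega
        have hlen : seq.toList.length = i + 1 := by omega
        have hd : seq.toList.drop i = [seq.toList[i]] := by
          rw [List.drop_eq_getElem_cons hi, List.drop_eq_nil_of_le (by omega)]
        have hneg : PySem.Str.pyGet? seq (-1) = some (seq.toList[i]) := by
          simp [PySem.List.pyGet?_neg_one, List.getLast?_eq_getElem?, hlen]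
        rw [hd, hneg]
        simp [revSem]
      · rw [if_neg he]
        simp only [PySem.Str.len_eq] at he
        simp [List.drop_eq_nil_of_le (by omega : seq.toList.length ≤ i), revSem]

theorem degLoop_other (seq strand : String) (hf : strand ≠ "forward") (hr : strand ≠ "reverse")
    (fuel : Nat) : ∀ (i : Nat) (result : String),
    seq.toList.length - i ≤ fuel →
    (degLoop seq strand i result).toList
      = result.toList ++ seq.toList.drop i := by
  induction fuel with
  | zero =>
    intro i result h
    rw [degLoop, dif_neg (by simp only [PySem.Str.len_eq]; omega),
        if_neg (by simp only [PySem.Str.len_eq]; omega)]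
    simp [List.drop_eq_nil_of_le (by omega : seq.toList.length ≤ i)]
  | succ n ih =>
    intro i result h
    rw [degLoop]
    by_cases hg : (i : Int) < PySem.Str.len seq - 1
    · rw [dif_pos hg]
      simp only [PySem.Str.len_eq] at hg
      have hi : i < seq.toList.length := by omega
      have hc : PySem.Str.pyGet? seq (i : Int) = some (seq.toList[i]) := by
        simp [List.getElem?_eq_getElem hi]
      have hd : seq.toList.drop i = seq.toList[i] :: seq.toList.drop (i+1) :=
        List.drop_eq_getElem_cons hi
      simp only [hc, Option.getD_some]
      rw [if_neg (by tauto), if_neg (by tauto), ih (i+1) _ (by omega), hd]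
      simp
    · rw [dif_neg hg]
      simp only [PySem.Str.len_eq] at hg
      by_cases he : (i : Int) = PySem.Str.len seq - 1
      · rw [if_pos he]
        simp only [PySem.Str.len_eq] at he
        have hi : i < seq.toList.length := by omega
        have hlen : seq.toList.length = i + 1 := by omega
        have hd : seq.toList.drop i = [seq.toList[i]] := by
          rw [List.drop_eq_getElem_cons hi, List.drop_eq_nil_of_le (by omega)]
        have hneg : PySem.Str.pyGet? seq (-1) = some (seq.toList[i]) := by
          simp [PySem.List.pyGet?_neg_one, List.getLast?_eq_getElem?, hlen]
        rw [hd, hneg]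
        simp
      · rw [if_neg he]
        simp only [PySem.Str.len_eq] at he
        simp [List.drop_eq_nil_of_le (by omega : seq.toList.length ≤ i)]

-- ===== VERDICT (by name: the statement is the Claim_ definition above) =====
theorem degenerate_primer_spec : Claim_equal_degenerate_primer := by
  intro seq strand _
  unfold Spec_degenerate_primer degenerate_primer degenerate_primer_alt
  by_cases hf : strand = "forward"
  · subst hf
    simp only [if_true]
    apply String.toList_injective
    rw [degLoop_fwd seq seq.toList.length 0 "" (by omega)]
    simp [PySem.Str.replace, ← replace_fwd]
  · by_cases hr : strand = "reverse"
    · subst hr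
      simp only [if_neg hf, if_true]
      apply String.toList_injective
      rw [degLoop_rev seq seq.toList.length 0 "" (by omega)]
      simp [PySem.Str.replace, ← replace_rev]
    · simp only [if_neg hf, if_neg hr]
      apply String.toList_injective
      rw [degLoop_other seq strand hf hr seq.toList.length 0 "" (by omega)]
      simp
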